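-- pv_equiv track=rewrite | github.com/tsetsefly/nand2tetris | hack-assembler/hack.py | read_and_format_input
-- ===== SOURCE A (Python) =====
-- from typing import List, Dict, Optional, Tuple
--
-- def format_line(line: str) -> Optional[str]:
--   line_parts = line.split("//", 1)
--   formatted_line = line_parts[0].strip()
--   return formatted_line or None
--
-- def read_and_format_input(input_lines: List[str]) -> Tuple[List[Optional[str]], Dict[str, str]]:
--   label_table: Dict[str,str] = {}
--   label_counter = 0
--   formatted_input: List[Optional[str]] = []
--
--   for line in input_lines:
--     formatted_line = format_line(line)
--     if formatted_line:
--       formatted_input.append(formatted_line)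
--
--     # creates table of label symbols, requires full pass of input to populate
--     if not formatted_line: # continue if whitespace, empty line and/or full line comment
--       continue
--     if formatted_line[0] == "(": # creates label definition
--       label_table[formatted_line[1:-1]] = str(label_counter)
--     else:
--       label_counter += 1
--
--   return formatted_input, label_table
-- ===== SOURCE B (Python) =====
-- from typing import List, Dict, Tuple
--
-- def read_and_format_input(input_lines: List[str]) -> Tuple[List[str], Dict[str, str]]:
--   # Clean the lines (drop '//' comments, strip whitespace, keep non-empty only).
--   cleaned: List[str] = []
--   for line in input_lines:
--     s = line.split("//", 1)[0].strip()
--     if s: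
--       cleaned.append(s)
--   # No running counter: the ROM address of the k-th label (at cleaned index i)
--   # is i - k, i.e. its position minus the number of labels preceding it.
--   labels = [(i, s) for i, s in enumerate(cleaned) if s.startswith("(")]
--   label_table = {s[1:-1]: str(i - k) for k, (i, s) in enumerate(labels)}
--   return cleaned, label_table
-- ===== Notes on version B (the rewrite author's own statement) =====
-- stated objective: alternative
-- what changed: Eliminates A's running address counter: B cleans the lines, collects the label lines with their positions via enumerate, and computes each label's address by the closed-form i - k (cleaned index minus label rank) in a dict comprehension, instead of threading a mutable counter through one interleaved loop.
import Mathlib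
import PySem

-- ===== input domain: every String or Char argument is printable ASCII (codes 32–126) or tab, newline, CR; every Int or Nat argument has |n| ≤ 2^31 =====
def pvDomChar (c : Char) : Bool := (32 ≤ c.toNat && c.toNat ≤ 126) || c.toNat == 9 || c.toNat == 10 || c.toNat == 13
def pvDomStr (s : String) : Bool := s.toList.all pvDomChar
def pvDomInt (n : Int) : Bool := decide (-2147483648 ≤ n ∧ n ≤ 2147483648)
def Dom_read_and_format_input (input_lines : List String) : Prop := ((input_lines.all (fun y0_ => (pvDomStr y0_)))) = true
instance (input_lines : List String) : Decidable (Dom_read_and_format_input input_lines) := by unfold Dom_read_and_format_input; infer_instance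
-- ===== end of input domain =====

-- B drops A's running address counter: it enumerates the cleaned lines, keeps the label lines
-- with their positions, and computes each label's address as the closed form i - k (cleaned
-- index minus label rank); objective: alternative (same cost, stateless addressing).

-- ===== PORT A =====
-- line.split("//", 1)[0]: split always returns a non-empty list, so headD "" is exact
def format_line (line : String) : Option String :=
  let line_parts := (PySem.Str.splitMax? line "//" 1).getD []
  let formatted_line := PySem.Str.strip (line_parts.headD "")
  if formatted_line = "" then none else some formatted_line

def read_and_format_input_stepA
    (st : List (Option String) × PySem.Dict String String × Int) (line : String) :
    List (Option String) × PySem.Dict String String × Int :=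
  match format_line line with
  | none => st                                             -- falsy: no append, continue
  | some f =>
    let fi := st.1 ++ [some f]
    if PySem.Str.pyGet? f 0 == some '(' then
      (fi, st.2.1.insert (PySem.Str.slice f (some 1) (some (-1))) (PySem.Int.toStr st.2.2), st.2.2)
    else
      (fi, st.2.1, st.2.2 + 1)

def read_and_format_input (input_lines : List String) :
    List (Option String) × (List (String × String)) :=
  let st := input_lines.foldl read_and_format_input_stepA ([], PySem.Dict.empty, 0)
  (st.1, st.2.1.items)

-- ===== PORT B =====
def read_and_format_input_clean (line : String) : String :=
  PySem.Str.strip (((PySem.Str.splitMax? line "//" 1).getD []).headD "")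

def read_and_format_input_alt (input_lines : List String) :
    List (Option String) × (List (String × String)) :=
  let cleaned := input_lines.foldl
    (fun acc line =>
      let s := read_and_format_input_clean line
      if s ≠ "" then acc ++ [s] else acc) []
  let labels := (PySem.List.enumerate cleaned 0).filter (fun p => PySem.Str.startswith p.2 "(")
  let table := (PySem.List.enumerate labels 0).foldl
    (fun d p => d.insert (PySem.Str.slice p.2.2 (some 1) (some (-1)))
                         (PySem.Int.toStr (p.2.1 - p.1)))
    PySem.Dict.empty
  (cleaned.map some, table.items)

-- ===== PRECONDITION & SPEC =====
def Spec_read_and_format_input (input_lines : List String) (out : List (Option String) × (List (String × String))) : Prop := out = read_and_format_input_alt input_lines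
instance (input_lines : List String) (out : List (Option String) × (List (String × String))) : Decidable (Spec_read_and_format_input input_lines out) := by unfold Spec_read_and_format_input; infer_instance

-- ===== CLAIM (what is proved, stated in full; the proofs are below) =====
def Claim_equal_read_and_format_input : Prop := ∀ (input_lines : List String), Dom_read_and_format_input input_lines → Spec_read_and_format_input input_lines (read_and_format_input input_lines)

-- ===== LEMMAS AND PROOFS =====

-- A's branch test 'f[0] == "("' equals startswith on a non-empty f
lemma pvBranch_eq (f : String) (hf : f ≠ "") :
    (PySem.Str.pyGet? f 0 == some '(') = PySem.Str.startswith f "(" := by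
  have h : f.toList ≠ [] := by
    intro h; apply hf; exact String.toList_injective (by simp [h])
  rcases hcs : f.toList with _ | ⟨c, rest⟩
  · exact absurd hcs h
  · simp [PySem.Str.pyGet?, PySem.Str.startswith, hcs, PySem.List.pyGet?, PySem.List.pyIdx?,
      PySem.Chars.startswith, List.isPrefixOf, eq_comm]

-- A's dict/counter loop over the cleaned lines, with counter written as i - k,
-- equals B's fold over the doubly-enumerated label list (address i - k).
lemma pvCounter_eq (xs : List String) :
    ∀ (d : PySem.Dict String String) (i k : Int), (∀ s ∈ xs, s ≠ "") →
    (xs.foldl (fun (st : PySem.Dict String String × Int) f =>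
        if PySem.Str.pyGet? f 0 == some '(' then
          (st.1.insert (PySem.Str.slice f (some 1) (some (-1))) (PySem.Int.toStr st.2), st.2)
        else (st.1, st.2 + 1)) (d, i - k)).1 =
    (PySem.List.enumerate ((PySem.List.enumerate xs i).filter
        (fun p => PySem.Str.startswith p.2 "(")) k).foldl
      (fun d p => d.insert (PySem.Str.slice p.2.2 (some 1) (some (-1)))
                           (PySem.Int.toStr (p.2.1 - p.1))) d := by
  induction xs with
  | nil => intro d i k _; simp [PySem.List.enumerate_nil]
  | cons s xs ih =>
    intro d i k hne
    have hs : s ≠ "" := hne s (List.mem_cons_self ..)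
    have hrest : ∀ t ∈ xs, t ≠ "" := fun t ht => hne t (List.mem_cons_of_mem _ ht)
    rw [PySem.List.enumerate_cons]
    simp only [List.foldl_cons, List.filter_cons]
    rw [pvBranch_eq s hs]
    by_cases hl : PySem.Str.startswith s "(" = true
    · simp only [hl, if_true, PySem.List.enumerate_cons, List.foldl_cons]
      rw [show (i - k : Int) = (i + 1) - (k + 1) from by ring]
      exact ih _ (i + 1) (k + 1) hrest
    · rw [Bool.not_eq_true] at hl
      simp only [hl]
      rw [show (i - k + 1 : Int) = (i + 1) - k from by ring]
      exact ih _ (i + 1) k hrest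

-- A's interleaved loop splits into the cleaned list and the dict/counter loop over it.
lemma pvLoop_eq (lines : List String) :
    ∀ (fi : List (Option String)) (d : PySem.Dict String String) (c : Int),
    lines.foldl read_and_format_input_stepA (fi, d, c) =
      (fi ++ (((lines.map read_and_format_input_clean).filter (fun s => s ≠ "")).map some),
       ((lines.map read_and_format_input_clean).filter (fun s => s ≠ "")).foldl
         (fun (st : PySem.Dict String String × Int) f =>
            if PySem.Str.pyGet? f 0 == some '(' then
              (st.1.insert (PySem.Str.slice f (some 1) (some (-1))) (PySem.Int.toStr st.2), st.2)
            else (st.1, st.2 + 1)) (d, c)) := by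
  induction lines with
  | nil => intro fi d c; simp
  | cons l ls ih =>
    intro fi d c
    by_cases h : read_and_format_input_clean l = ""
    · have hA : format_line l = none := by
        simp [format_line, read_and_format_input_clean] at h ⊢; exact h
      simp [List.foldl_cons, read_and_format_input_stepA, hA, h, ih]
    · have hA : format_line l = some (read_and_format_input_clean l) := by
        simp [format_line, read_and_format_input_clean] at h ⊢; exact h
      simp only [List.foldl_cons, List.map_cons, List.filter_cons, h, decide_not,
        read_and_format_input_stepA, hA, decide_false, Bool.not_false, if_true]
      split
      · rw [ih]; simp
      · rw [ih]; simp

-- B's cleaning loop builds exactly the filtered map of cleaned lines.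
lemma pvClean_aux (lines : List String) : ∀ acc : List String,
    lines.foldl (fun acc line =>
      if read_and_format_input_clean line = "" then acc
      else acc ++ [read_and_format_input_clean line]) acc
    = acc ++ (lines.map read_and_format_input_clean).filter
        (fun s => !decide (s = "")) := by
  induction lines with
  | nil => intro acc; simp
  | cons l ls ih =>
    intro acc
    by_cases h : read_and_format_input_clean l = ""
    · simp [h, ih]
    · simp [h, ih]

lemma pvClean_eq (lines : List String) (acc : List String) :
    lines.foldl (fun acc line =>
      let s := read_and_format_input_clean line
      if s ≠ "" then acc ++ [s] else acc) acc
    = acc ++ (lines.map read_and_format_input_clean).filter (fun s => s ≠ "") := by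
  simp only [ne_eq, ite_not, decide_not]
  exact pvClean_aux lines acc

theorem read_and_format_input_spec : Claim_equal_read_and_format_input := by
  intro input_lines _
  unfold Spec_read_and_format_input read_and_format_input read_and_format_input_alt
  rw [pvLoop_eq, pvClean_eq]
  have hC := pvCounter_eq ((input_lines.map read_and_format_input_clean).filter
      (fun s => s ≠ "")) PySem.Dict.empty 0 0
    (by intro s hs; simpa using (List.mem_filter.mp hs).2)
  norm_num at hC
  simp [hC]
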